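-- pv_equiv track=rewrite | github.com/iisaduan/toRNAdo | nussinov.py | count_overlapping_basepairs
-- ===== SOURCE A (Python) =====
-- def count_overlapping_basepairs(folding: list) -> list:
--     """
--     Given an RNA folding
--
--     Return a 3D list dp.
--     dp[i][j][k] = the number of basepairs contained in rna[i:j+1]
--                       that overlap position k.
--     For example, a basepair (2,4) overlaps position 2, 3, and 4.
--     """
--     N = len(folding)
--     dp = [[[0 for k in range(N)] for j in range(N)] for i in range(N+1)]
--     for start in reversed(range(0, N)):
--         for end in range(0, N):
--             for pos in range(start, end+1):
--                 pair_index = folding[start]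
--                 is_start_pair_overlap = start < pair_index <= end and pair_index >= pos
--                 dp[start][end][pos] = dp[start+1][end][pos] + int(is_start_pair_overlap)
--     return dp
-- ===== SOURCE B (Python) =====
-- def count_overlapping_basepairs(folding: list) -> list:
--     """
--     Given an RNA folding
--
--     Return a 3D list dp.
--     dp[i][j][k] = the number of basepairs contained in rna[i:j+1]
--                       that overlap position k.
--
--     Strategy: build a 2D prefix-sum table P over the 0/1 pairing matrix
--     M[s][p] = 1 iff folding[s] == p and s < p (a real basepair); then every
--     dp cell is an O(1) inclusion-exclusion rectangle query counting
--     #{(s, p) : start <= s <= pos, pos <= p <= end, M[s][p] = 1}.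
--     """
--     N = len(folding)
--     # P[s][p] = number of pairs (s', p') with s' < s, p' < p, folding[s'] == p', s' < p'
--     P = [[0] * (N + 1) for _ in range(N + 1)]
--     for s in range(N):
--         p0 = folding[s]
--         for p in range(N):
--             P[s + 1][p + 1] = P[s + 1][p] + P[s][p + 1] - P[s][p] + (1 if p0 == p and s < p else 0)
--     dp = [[[0] * N for _ in range(N)] for _ in range(N + 1)]
--     for start in range(N):
--         for end in range(N):
--             for pos in range(start, end + 1):
--                 dp[start][end][pos] = P[pos + 1][end + 1] - P[start][end + 1] - P[pos + 1][pos] + P[start][pos]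
--     return dp
-- ===== Notes on version B (the rewrite author's own statement) =====
-- stated objective: alternative
-- what changed: Replaces the layer-by-layer suffix recurrence dp[start]=dp[start+1]+indicator with a 2D prefix-sum table over the 0/1 basepair matrix, each dp cell becoming an O(1) inclusion-exclusion rectangle query.
import Mathlib
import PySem

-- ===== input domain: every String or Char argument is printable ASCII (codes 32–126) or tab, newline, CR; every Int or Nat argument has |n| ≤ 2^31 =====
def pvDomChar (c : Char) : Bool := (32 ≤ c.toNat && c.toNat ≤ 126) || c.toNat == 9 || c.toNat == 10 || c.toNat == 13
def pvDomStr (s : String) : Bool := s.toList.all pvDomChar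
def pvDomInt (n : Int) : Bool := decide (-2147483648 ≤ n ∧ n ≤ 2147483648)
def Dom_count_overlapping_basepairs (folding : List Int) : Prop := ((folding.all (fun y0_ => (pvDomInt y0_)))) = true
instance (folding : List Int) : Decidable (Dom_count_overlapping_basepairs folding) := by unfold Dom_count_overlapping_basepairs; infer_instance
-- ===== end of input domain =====

-- B replaces A's suffix recurrence over start with a 2D prefix-sum table and O(1)
-- rectangle queries per cell (objective: alternative algorithm, same output).

-- ===== PORT A =====
-- Python `dp[i][j][k] = v` / `dp[i][j][k]` on nested lists; every index used by
-- either program is nonnegative and in range, so pySetD/pyGetD are exact here.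
def pvWrite3 (dp : List (List (List Int))) (i j k : Int) (v : Int) : List (List (List Int)) :=
  PySem.List.pySetD dp i
    (PySem.List.pySetD (PySem.List.pyGetD dp i []) j
      (PySem.List.pySetD (PySem.List.pyGetD (PySem.List.pyGetD dp i []) j []) k v))

def pvRead3 (dp : List (List (List Int))) (i j k : Int) : Int :=
  PySem.List.pyGetD (PySem.List.pyGetD (PySem.List.pyGetD dp i []) j []) k 0

-- body of A's `for pos in range(start, end+1)` loop
def pvBodyA (folding : List Int) (start end_ : Int) (dp : List (List (List Int))) (pos : Int) : List (List (List Int)) :=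
  let pair_index := PySem.List.pyGetD folding start 0
  let is_start_pair_overlap : Bool :=
    (decide (start < pair_index ∧ pair_index ≤ end_)) && decide (pair_index ≥ pos)
  pvWrite3 dp start end_ pos
    (pvRead3 dp (start + 1) end_ pos + (if is_start_pair_overlap then 1 else 0))

def count_overlapping_basepairs (folding : List Int) : List (List (List Int)) :=
  let N : Int := (folding.length : Int)
  let dp : List (List (List Int)) :=
    (PySem.List.pyRange 0 (N + 1) 1).map (fun _ =>
      (PySem.List.pyRange 0 N 1).map (fun _ =>
        (PySem.List.pyRange 0 N 1).map (fun _ => (0 : Int))))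
  ((PySem.List.pyRange 0 N 1).reverse).foldl (fun dp start =>
    (PySem.List.pyRange 0 N 1).foldl (fun dp end_ =>
      (PySem.List.pyRange start (end_ + 1) 1).foldl (pvBodyA folding start end_) dp) dp) dp

-- ===== PORT B =====
def pvWrite2 (P : List (List Int)) (i j : Int) (v : Int) : List (List Int) :=
  PySem.List.pySetD P i (PySem.List.pySetD (PySem.List.pyGetD P i []) j v)

def pvRead2 (P : List (List Int)) (i j : Int) : Int :=
  PySem.List.pyGetD (PySem.List.pyGetD P i []) j 0

-- body of B's inner prefix-sum loop `for p in range(N)`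
def pvBodyBP (folding : List Int) (s : Int) (P : List (List Int)) (p : Int) : List (List Int) :=
  let p0 := PySem.List.pyGetD folding s 0
  pvWrite2 P (s + 1) (p + 1)
    (pvRead2 P (s + 1) p + pvRead2 P s (p + 1) - pvRead2 P s p +
      (if p0 = p ∧ s < p then (1 : Int) else 0))

-- body of B's `for pos in range(start, end+1)` loop: an O(1) rectangle query in P
def pvBodyBdp (P : List (List Int)) (start end_ : Int) (dp : List (List (List Int))) (pos : Int) : List (List (List Int)) :=
  pvWrite3 dp start end_ pos
    (pvRead2 P (pos + 1) (end_ + 1) - pvRead2 P start (end_ + 1) -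
      pvRead2 P (pos + 1) pos + pvRead2 P start pos)

def count_overlapping_basepairs_alt (folding : List Int) : List (List (List Int)) :=
  let N : Int := (folding.length : Int)
  let P0 : List (List Int) :=
    (PySem.List.pyRange 0 (N + 1) 1).map (fun _ => (PySem.List.pyRange 0 (N + 1) 1).map (fun _ => (0 : Int)))
  let P := (PySem.List.pyRange 0 N 1).foldl (fun P s =>
      (PySem.List.pyRange 0 N 1).foldl (pvBodyBP folding s) P) P0
  let dp : List (List (List Int)) :=
    (PySem.List.pyRange 0 (N + 1) 1).map (fun _ =>
      (PySem.List.pyRange 0 N 1).map (fun _ =>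
        (PySem.List.pyRange 0 N 1).map (fun _ => (0 : Int))))
  (PySem.List.pyRange 0 N 1).foldl (fun dp start =>
    (PySem.List.pyRange 0 N 1).foldl (fun dp end_ =>
      (PySem.List.pyRange start (end_ + 1) 1).foldl (pvBodyBdp P start end_) dp) dp) dp

-- ===== PRECONDITION & SPEC =====
def Spec_count_overlapping_basepairs (folding : List Int) (out : List (List (List Int))) : Prop := out = count_overlapping_basepairs_alt folding
instance (folding : List Int) (out : List (List (List Int))) : Decidable (Spec_count_overlapping_basepairs folding out) := by unfold Spec_count_overlapping_basepairs; infer_instance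

-- ===== CLAIM (what is proved, stated in full; the proofs are below) =====
def Claim_equal_count_overlapping_basepairs : Prop := ∀ (folding : List Int), Dom_count_overlapping_basepairs folding → Spec_count_overlapping_basepairs folding (count_overlapping_basepairs folding)

-- ===== LEMMAS AND PROOFS =====

-- folding[s] as read by both programs (always in range where used)
def pvF (folding : List Int) (s : Nat) : Int := folding.getD s 0

-- 1 iff the basepair starting at s overlaps position p inside window [·, e]
def pvInd (folding : List Int) (s e p : Nat) : Int :=
  if (s : Int) < pvF folding s ∧ pvF folding s ≤ (e : Int) ∧ (p : Int) ≤ pvF folding s then 1 else 0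

-- closed form of A's recurrence, layer by layer from the top
def pvFin (folding : List Int) (start e p : Nat) : Int :=
  if _h : start < folding.length then
    if start ≤ p ∧ p ≤ e then pvFin folding (start + 1) e p + pvInd folding start e p else 0
  else 0
termination_by folding.length - start
decreasing_by omega

-- the 2D prefix-sum value B's table holds at (s, p)
def pvPval (folding : List Int) (s p : Nat) : Int :=
  ((List.range s).map (fun (s' : Nat) =>
    if (s' : Int) < pvF folding s' ∧ pvF folding s' < (p : Int) then (1 : Int) else 0)).sum

-- B's rectangle query
def pvCellB (folding : List Int) (i e p : Nat) : Int :=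
  pvPval folding (p + 1) (e + 1) - pvPval folding i (e + 1) -
    pvPval folding (p + 1) p + pvPval folding i p

-- abstract tables: every intermediate state of either program is one of these
def pvTb2 (n : Nat) (H : Nat → Nat → Int) : List (List Int) :=
  (List.range (n + 1)).map fun s => (List.range (n + 1)).map fun p => H s p

def pvTb3 (n : Nat) (H : Nat → Nat → Nat → Int) : List (List (List Int)) :=
  (List.range (n + 1)).map fun i => (List.range n).map fun e => (List.range n).map fun p => H i e p

lemma pvFin_eq (folding : List Int) (start e p : Nat) :
    pvFin folding start e p =
      if start < folding.length then
        (if start ≤ p ∧ p ≤ e then pvFin folding (start + 1) e p + pvInd folding start e p else 0)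
      else 0 := by
  rw [pvFin]; split_ifs <;> rfl

lemma map_range_set {α : Type} (g : Nat → α) (N k : Nat) (w : α) (hk : k < N) :
    ((List.range N).map g).set k w = (List.range N).map (fun x => if x = k then w else g x) := by
  apply List.ext_getElem (by simp)
  intro idx h1 h2
  simp only [List.getElem_set, List.getElem_map, List.getElem_range]
  by_cases hik : idx = k
  · subst hik; simp
  · rw [if_neg (Ne.symm hik), if_neg hik]

lemma pvTb3_congr (n : Nat) (H H' : Nat → Nat → Nat → Int)
    (h : ∀ i e p, i ≤ n → e < n → p < n → H i e p = H' i e p) : pvTb3 n H = pvTb3 n H' := by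
  unfold pvTb3
  apply List.map_congr_left; intro i hi
  apply List.map_congr_left; intro e he
  apply List.map_congr_left; intro p hp
  simp only [List.mem_range] at hi he hp
  exact h i e p (by omega) he hp

lemma pvTb2_congr (n : Nat) (H H' : Nat → Nat → Int)
    (h : ∀ s p, s ≤ n → p ≤ n → H s p = H' s p) : pvTb2 n H = pvTb2 n H' := by
  unfold pvTb2
  apply List.map_congr_left; intro s hs
  apply List.map_congr_left; intro p hp
  simp only [List.mem_range] at hs hp
  exact h s p (by omega) (by omega)

lemma pvRead3_tb3 (n : Nat) (H : Nat → Nat → Nat → Int) (i e p : Nat)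
    (hi : i ≤ n) (he : e < n) (hp : p < n) :
    pvRead3 (pvTb3 n H) (i : Int) (e : Int) (p : Int) = H i e p := by
  unfold pvRead3 pvTb3
  simp only [PySem.List.pyGetD_natCast]
  rw [PySem.List.getD_map_range _ _ _ _ (by omega : i < n + 1),
      PySem.List.getD_map_range _ _ _ _ he,
      PySem.List.getD_map_range _ _ _ _ hp]

lemma pvWrite3_tb3 (n : Nat) (H : Nat → Nat → Nat → Int) (i e p : Nat) (v : Int)
    (hi : i ≤ n) (he : e < n) (hp : p < n) :
    pvWrite3 (pvTb3 n H) (i : Int) (e : Int) (p : Int) v =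
      pvTb3 n (fun x y z => if x = i ∧ y = e ∧ z = p then v else H x y z) := by
  unfold pvWrite3 pvTb3
  simp only [PySem.List.pySetD_natCast, PySem.List.pyGetD_natCast]
  rw [PySem.List.getD_map_range _ _ _ _ (by omega : i < n + 1),
      PySem.List.getD_map_range _ _ _ _ he,
      map_range_set _ _ _ _ hp, map_range_set _ _ _ _ he,
      map_range_set _ _ _ _ (by omega : i < n + 1)]
  apply List.map_congr_left; intro x hx
  by_cases hxi : x = i
  · subst hxi
    rw [if_pos rfl]
    apply List.map_congr_left; intro y hy
    by_cases hye : y = e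
    · subst hye
      rw [if_pos rfl]
      apply List.map_congr_left; intro z hz
      by_cases hzp : z = p
      · subst hzp; simp
      · simp [hzp]
    · simp [hye]
  · simp [hxi]

lemma pvRead2_tb2 (n : Nat) (H : Nat → Nat → Int) (s p : Nat) (hs : s ≤ n) (hp : p ≤ n) :
    pvRead2 (pvTb2 n H) (s : Int) (p : Int) = H s p := by
  unfold pvRead2 pvTb2
  simp only [PySem.List.pyGetD_natCast]
  rw [PySem.List.getD_map_range _ _ _ _ (by omega : s < n + 1),
      PySem.List.getD_map_range _ _ _ _ (by omega : p < n + 1)]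

lemma pvWrite2_tb2 (n : Nat) (H : Nat → Nat → Int) (s p : Nat) (v : Int)
    (hs : s ≤ n) (hp : p ≤ n) :
    pvWrite2 (pvTb2 n H) (s : Int) (p : Int) v =
      pvTb2 n (fun x y => if x = s ∧ y = p then v else H x y) := by
  unfold pvWrite2 pvTb2
  simp only [PySem.List.pySetD_natCast, PySem.List.pyGetD_natCast]
  rw [PySem.List.getD_map_range _ _ _ _ (by omega : s < n + 1),
      map_range_set _ _ _ _ (by omega : p < n + 1),
      map_range_set _ _ _ _ (by omega : s < n + 1)]
  apply List.map_congr_left; intro x hx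
  by_cases hxs : x = s
  · subst hxs
    rw [if_pos rfl]
    apply List.map_congr_left; intro y hy
    by_cases hyp : y = p
    · subst hyp; simp
    · simp [hyp]
  · simp [hxs]

-- ===== A-side loop characterisation =====

lemma foldA_inner (folding : List Int) (m j : Nat) (hm : m < folding.length) (hj : j < folding.length)
    (hmj : m ≤ j) :
    ∀ (k c : Nat), c + k = j + 1 → m ≤ c → ∀ (H : Nat → Nat → Nat → Int),
    (∀ e p, e < folding.length → p < folding.length →
        H (m + 1) e p = pvFin folding (m + 1) e p) →
    (PySem.List.pyRange (c : Int) ((j : Int) + 1) 1).foldl (pvBodyA folding (m : Int) (j : Int)) (pvTb3 folding.length H)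
      = pvTb3 folding.length (fun x y z =>
          if x = m ∧ y = j ∧ c ≤ z ∧ z ≤ j then pvFin folding m j z else H x y z) := by
  intro k
  induction k with
  | zero =>
    intro c hc hmc H hH
    rw [PySem.List.pyRange_one_eq_nil (by omega)]
    simp only [List.foldl_nil]
    apply pvTb3_congr
    intro x y z _ _ _
    rw [if_neg (by rintro ⟨_, _, h3, h4⟩; omega)]
  | succ k ih =>
    intro c hc hmc H hH
    have hcj : c ≤ j := by omega
    have hcn : c < folding.length := by omega
    rw [PySem.List.pyRange_one_cons (by omega)]
    simp only [List.foldl_cons]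
    have hval : pvFin folding (m + 1) j c +
        (if (decide ((m : Int) < pvF folding m ∧ pvF folding m ≤ (j : Int))) &&
            decide (pvF folding m ≥ (c : Int)) then (1 : Int) else 0) = pvFin folding m j c := by
      have hfin := pvFin_eq folding m j c
      rw [if_pos hm, if_pos (show m ≤ c ∧ c ≤ j from ⟨hmc, hcj⟩)] at hfin
      rw [hfin]
      congr 1
      unfold pvInd
      simp only [Bool.and_eq_true, decide_eq_true_eq, ge_iff_le, and_assoc]
    have hbody : pvBodyA folding (m : Int) (j : Int) (pvTb3 folding.length H) (c : Int)
        = pvTb3 folding.length (fun x y z =>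
            if x = m ∧ y = j ∧ z = c then pvFin folding m j c else H x y z) := by
      simp only [pvBodyA, PySem.List.pyGetD_natCast]
      rw [show ((m : Int) + 1) = ((m + 1 : Nat) : Int) by push_cast; ring]
      rw [pvRead3_tb3 _ _ _ _ _ (by omega) hj hcn]
      rw [hH j c hj hcn]
      rw [pvWrite3_tb3 _ _ _ _ _ _ (by omega) hj hcn]
      apply pvTb3_congr
      intro x y z _ _ _
      by_cases hxyz : x = m ∧ y = j ∧ z = c
      · rw [if_pos hxyz, if_pos hxyz]
        obtain ⟨h1, h2, h3⟩ := hxyz; subst h1; subst h2; subst h3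
        exact hval
      · rw [if_neg hxyz, if_neg hxyz]
    rw [hbody]
    rw [show ((c : Int) + 1) = ((c + 1 : Nat) : Int) by push_cast; ring]
    rw [ih (c + 1) (by omega) (by omega) _
      (by intro e p he hp
          rw [if_neg (by rintro ⟨h1, _⟩; omega)]
          exact hH e p he hp)]
    apply pvTb3_congr
    intro x y z _ _ _
    by_cases hxy : x = m ∧ y = j
    · obtain ⟨h1, h2⟩ := hxy
      by_cases hz1 : c + 1 ≤ z ∧ z ≤ j
      · rw [if_pos ⟨h1, h2, hz1.1, hz1.2⟩, if_pos ⟨h1, h2, by omega, hz1.2⟩]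
      · rw [if_neg (by rintro ⟨_, _, h3, h4⟩; exact hz1 ⟨h3, h4⟩)]
        by_cases hz2 : z = c
        · rw [if_pos ⟨h1, h2, hz2⟩, if_pos ⟨h1, h2, by omega, by omega⟩, hz2]
        · rw [if_neg (by rintro ⟨_, _, h3⟩; exact hz2 h3),
              if_neg (by rintro ⟨_, _, h3, h4⟩; omega)]
    · rw [if_neg (by tauto), if_neg (by tauto), if_neg (by tauto)]

lemma foldA_mid (folding : List Int) (m : Nat) (hm : m < folding.length) :
    ∀ (k jj : Nat), jj + k = folding.length → ∀ (H : Nat → Nat → Nat → Int),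
    (∀ e p, e < folding.length → p < folding.length →
        H (m + 1) e p = pvFin folding (m + 1) e p) →
    (PySem.List.pyRange (jj : Int) (folding.length : Int) 1).foldl
        (fun dp end_ => (PySem.List.pyRange (m : Int) (end_ + 1) 1).foldl (pvBodyA folding (m : Int) end_) dp)
        (pvTb3 folding.length H)
      = pvTb3 folding.length (fun x y z =>
          if x = m ∧ jj ≤ y ∧ m ≤ z ∧ z ≤ y then pvFin folding m y z else H x y z) := by
  intro k
  induction k with
  | zero =>
    intro jj hjj H hH
    rw [PySem.List.pyRange_one_eq_nil (by omega)]
    simp only [List.foldl_nil]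
    apply pvTb3_congr
    intro x y z _ hy _
    rw [if_neg (by rintro ⟨_, h2, _, _⟩; omega)]
  | succ k ih =>
    intro jj hjj H hH
    have hjn : jj < folding.length := by omega
    rw [PySem.List.pyRange_one_cons (by omega)]
    simp only [List.foldl_cons]
    by_cases hmjj : m ≤ jj
    · rw [foldA_inner folding m jj hm hjn hmjj (jj + 1 - m) m (by omega) (le_refl m) H hH]
      rw [show ((jj : Int) + 1) = ((jj + 1 : Nat) : Int) by push_cast; ring]
      rw [ih (jj + 1) (by omega) _
        (by intro e p he hp
            rw [if_neg (by rintro ⟨h1, _⟩; omega)]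
            exact hH e p he hp)]
      apply pvTb3_congr
      intro x y z _ hy _
      by_cases hx : x = m
      · by_cases hy1 : jj + 1 ≤ y ∧ m ≤ z ∧ z ≤ y
        · rw [if_pos ⟨hx, hy1⟩, if_pos ⟨hx, by omega, hy1.2⟩]
        · rw [if_neg (by rintro ⟨_, h2, h3⟩; exact hy1 ⟨h2, h3⟩)]
          by_cases hy2 : y = jj ∧ m ≤ z ∧ z ≤ jj
          · rw [if_pos ⟨hx, hy2⟩, if_pos ⟨hx, by omega, hy2.2.1, by omega⟩, hy2.1]
          · rw [if_neg (by rintro ⟨_, h2, h3⟩; exact hy2 ⟨h2, h3⟩),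
                if_neg (by
                  rintro ⟨_, h2, h3, h4⟩
                  rcases Nat.lt_or_ge y (jj + 1) with hlt | hge
                  · exact hy2 ⟨by omega, h3, by omega⟩
                  · exact hy1 ⟨hge, h3, h4⟩)]
      · rw [if_neg (by tauto), if_neg (by tauto), if_neg (by tauto)]
    · rw [PySem.List.pyRange_one_eq_nil (by omega)]
      simp only [List.foldl_nil]
      rw [show ((jj : Int) + 1) = ((jj + 1 : Nat) : Int) by push_cast; ring]
      rw [ih (jj + 1) (by omega) H hH]
      apply pvTb3_congr
      intro x y z _ _ _
      by_cases hcond : x = m ∧ jj + 1 ≤ y ∧ m ≤ z ∧ z ≤ y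
      · rw [if_pos hcond, if_pos ⟨hcond.1, by omega, hcond.2.2⟩]
      · rw [if_neg hcond, if_neg (by rintro ⟨h1, h2, h3, h4⟩; exact hcond ⟨h1, by omega, h3, h4⟩)]

-- layer i holds its final value once the outer loop has reached down to t
def pvHt (folding : List Int) (t : Nat) : Nat → Nat → Nat → Int :=
  fun i e p => if t ≤ i then pvFin folding i e p else 0

lemma foldA_outer (folding : List Int) :
    ∀ (m : Nat), m ≤ folding.length →
    (((List.range m).reverse.map (fun k : Nat => (k : Int))).foldl
        (fun dp start => (PySem.List.pyRange 0 (folding.length : Int) 1).foldl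
          (fun dp end_ => (PySem.List.pyRange start (end_ + 1) 1).foldl (pvBodyA folding start end_) dp) dp)
        (pvTb3 folding.length (pvHt folding m)))
      = pvTb3 folding.length (pvHt folding 0) := by
  intro m
  induction m with
  | zero => intro _; simp
  | succ m ih =>
    intro hm1
    have hm : m < folding.length := by omega
    rw [List.range_succ, List.reverse_append, List.reverse_singleton]
    simp only [List.map_cons, List.singleton_append, List.foldl_cons]
    have hmid := foldA_mid folding m hm folding.length 0 (by omega) (pvHt folding (m + 1))
      (by intro e p _ _; unfold pvHt; rw [if_pos (le_refl _)])
    simp only [Nat.cast_zero] at hmid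
    rw [hmid]
    have hstep : pvTb3 folding.length (fun x y z =>
        if x = m ∧ 0 ≤ y ∧ m ≤ z ∧ z ≤ y then pvFin folding m y z else pvHt folding (m + 1) x y z)
        = pvTb3 folding.length (pvHt folding m) := by
      apply pvTb3_congr
      intro x y z _ _ _
      unfold pvHt
      by_cases hx : x = m
      · rw [hx, if_pos (le_refl m)]
        by_cases hband : m ≤ z ∧ z ≤ y
        · rw [if_pos ⟨rfl, Nat.zero_le y, hband⟩]
        · rw [if_neg (by rintro ⟨_, _, h3⟩; exact hband h3), if_neg (by omega),
              pvFin_eq, if_pos hm, if_neg hband]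
      · rw [if_neg (by tauto)]
        by_cases hx2 : m ≤ x
        · rw [if_pos (by omega), if_pos hx2]
        · rw [if_neg (by omega), if_neg hx2]
    rw [hstep]
    exact ih (by omega)

lemma A_eq (folding : List Int) :
    count_overlapping_basepairs folding = pvTb3 folding.length (pvHt folding 0) := by
  simp only [count_overlapping_basepairs]
  have hinit : (PySem.List.pyRange 0 ((folding.length : Int) + 1) 1).map (fun _ =>
      (PySem.List.pyRange 0 (folding.length : Int) 1).map (fun _ =>
        (PySem.List.pyRange 0 (folding.length : Int) 1).map (fun _ => (0 : Int))))
      = pvTb3 folding.length (pvHt folding folding.length) := by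
    rw [show ((folding.length : Int) + 1) = ((folding.length + 1 : Nat) : Int) by push_cast; ring,
        PySem.List.pyRange_zero_nat, PySem.List.pyRange_zero_nat]
    unfold pvTb3
    simp only [List.map_map]
    apply List.map_congr_left
    intro i hi
    simp only [List.mem_range] at hi
    apply List.map_congr_left
    intro e _
    apply List.map_congr_left
    intro p _
    simp only [Function.comp]
    unfold pvHt
    by_cases hni : folding.length ≤ i
    · rw [if_pos hni, pvFin_eq, if_neg (by omega)]
    · rw [if_neg hni]
  rw [hinit]
  have hlist : (PySem.List.pyRange 0 (folding.length : Int) 1).reverse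
      = (List.range folding.length).reverse.map (fun k : Nat => (k : Int)) := by
    rw [PySem.List.pyRange_zero_nat]
    exact List.map_reverse.symm
  rw [hlist]
  exact foldA_outer folding folding.length (le_refl _)

-- ===== B-side: the prefix-sum table =====

lemma pvPval_zero_right (folding : List Int) (s : Nat) : pvPval folding s 0 = 0 := by
  unfold pvPval
  apply List.sum_eq_zero
  intro x hx
  simp only [List.mem_map, List.mem_range] at hx
  obtain ⟨s', _, rfl⟩ := hx
  rw [if_neg (by rintro ⟨h1, h2⟩; omega)]

lemma pvPval_succ (folding : List Int) (s p : Nat) :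
    pvPval folding (s + 1) p = pvPval folding s p +
      (if (s : Int) < pvF folding s ∧ pvF folding s < (p : Int) then (1 : Int) else 0) := by
  unfold pvPval
  rw [List.range_succ]
  simp only [List.map_append, List.map_cons, List.map_nil, List.sum_append, List.sum_cons,
    List.sum_nil, add_zero]

lemma pvPval_rec (folding : List Int) (s p : Nat) :
    pvPval folding (s + 1) (p + 1) =
      pvPval folding (s + 1) p + pvPval folding s (p + 1) - pvPval folding s p +
        (if pvF folding s = (p : Int) ∧ (s : Int) < (p : Int) then (1 : Int) else 0) := by
  rw [pvPval_succ, pvPval_succ]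
  have hsplit : (if (s : Int) < pvF folding s ∧ pvF folding s < ((p + 1 : Nat) : Int) then (1 : Int) else 0)
      = (if (s : Int) < pvF folding s ∧ pvF folding s < (p : Int) then (1 : Int) else 0)
        + (if pvF folding s = (p : Int) ∧ (s : Int) < (p : Int) then (1 : Int) else 0) := by
    push_cast
    split_ifs <;> omega
  rw [hsplit]
  ring

lemma foldBP_inner (folding : List Int) (s : Nat) (hs : s < folding.length) :
    ∀ (k c : Nat), c + k = folding.length → ∀ (H : Nat → Nat → Int),
    (∀ p, p ≤ folding.length → H s p = pvPval folding s p) →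
    H (s + 1) c = pvPval folding (s + 1) c →
    (PySem.List.pyRange (c : Int) (folding.length : Int) 1).foldl (pvBodyBP folding (s : Int)) (pvTb2 folding.length H)
      = pvTb2 folding.length (fun x y =>
          if x = s + 1 ∧ c < y ∧ y ≤ folding.length then pvPval folding (s + 1) y else H x y) := by
  intro k
  induction k with
  | zero =>
    intro c hc H hrow hcell
    rw [PySem.List.pyRange_one_eq_nil (by omega)]
    simp only [List.foldl_nil]
    apply pvTb2_congr
    intro x y _ _
    rw [if_neg (by rintro ⟨_, h2, h3⟩; omega)]
  | succ k ih =>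
    intro c hc H hrow hcell
    have hcn : c < folding.length := by omega
    rw [PySem.List.pyRange_one_cons (by omega)]
    simp only [List.foldl_cons]
    have hbody : pvBodyBP folding (s : Int) (pvTb2 folding.length H) (c : Int)
        = pvTb2 folding.length (fun x y =>
            if x = s + 1 ∧ y = c + 1 then pvPval folding (s + 1) (c + 1) else H x y) := by
      simp only [pvBodyBP, PySem.List.pyGetD_natCast]
      rw [show ((s : Int) + 1) = ((s + 1 : Nat) : Int) by push_cast; ring,
          show ((c : Int) + 1) = ((c + 1 : Nat) : Int) by push_cast; ring]
      rw [pvRead2_tb2 _ _ _ _ (by omega) (by omega),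
          pvRead2_tb2 _ _ _ _ (by omega) (by omega),
          pvRead2_tb2 _ _ _ _ (by omega) (by omega),
          pvWrite2_tb2 _ _ _ _ _ (by omega) (by omega)]
      rw [hcell, hrow (c + 1) (by omega), hrow c (by omega)]
      apply pvTb2_congr
      intro x y _ _
      by_cases hxy : x = s + 1 ∧ y = c + 1
      · rw [if_pos hxy, if_pos hxy, pvPval_rec]
        have : pvF folding s = folding.getD s 0 := rfl
        rw [this]
      · rw [if_neg hxy, if_neg hxy]
    rw [hbody]
    rw [show ((c : Int) + 1) = ((c + 1 : Nat) : Int) by push_cast; ring]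
    rw [ih (c + 1) (by omega) _
      (by intro p hp
          rw [if_neg (by rintro ⟨h1, _⟩; omega)]
          exact hrow p hp)
      (by rw [if_pos ⟨rfl, rfl⟩])]
    apply pvTb2_congr
    intro x y _ _
    by_cases hx : x = s + 1
    · by_cases hy1 : c + 1 < y ∧ y ≤ folding.length
      · rw [if_pos ⟨hx, hy1⟩, if_pos ⟨hx, by omega, hy1.2⟩]
      · rw [if_neg (by rintro ⟨_, h2, h3⟩; exact hy1 ⟨h2, h3⟩)]
        by_cases hy2 : y = c + 1
        · rw [if_pos ⟨hx, hy2⟩, if_pos ⟨hx, by omega, by omega⟩, hy2]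
        · rw [if_neg (by rintro ⟨_, h2⟩; exact hy2 h2),
              if_neg (by rintro ⟨_, h2, h3⟩; omega)]
    · rw [if_neg (by tauto), if_neg (by tauto), if_neg (by tauto)]

lemma foldBP_outer (folding : List Int) :
    ∀ (k ss : Nat), ss + k = folding.length → ∀ (H : Nat → Nat → Int),
    (∀ x y, x ≤ ss → y ≤ folding.length → H x y = pvPval folding x y) →
    (∀ x y, ss < x → x ≤ folding.length → y ≤ folding.length → H x y = 0) →
    (PySem.List.pyRange (ss : Int) (folding.length : Int) 1).foldl
        (fun P s => (PySem.List.pyRange 0 (folding.length : Int) 1).foldl (pvBodyBP folding s) P)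
        (pvTb2 folding.length H)
      = pvTb2 folding.length (fun x y => pvPval folding x y) := by
  intro k
  induction k with
  | zero =>
    intro ss hss H h1 _
    rw [show PySem.List.pyRange (ss : Int) (folding.length : Int) 1 = []
        from PySem.List.pyRange_one_eq_nil (by omega)]
    simp only [List.foldl_nil]
    apply pvTb2_congr
    intro x y hx hy
    exact h1 x y (by omega) hy
  | succ k ih =>
    intro ss hss H h1 h2
    have hsn : ss < folding.length := by omega
    rw [show PySem.List.pyRange (ss : Int) (folding.length : Int) 1
          = (ss : Int) :: PySem.List.pyRange ((ss : Int) + 1) (folding.length : Int) 1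
        from PySem.List.pyRange_one_cons (by omega)]
    simp only [List.foldl_cons]
    have hinner := foldBP_inner folding ss hsn folding.length 0 (by omega) H
      (by intro p hp; exact h1 ss p (le_refl _) hp)
      (by rw [h2 (ss + 1) 0 (by omega) (by omega) (by omega), pvPval_zero_right])
    simp only [Nat.cast_zero] at hinner
    rw [hinner]
    rw [show ((ss : Int) + 1) = ((ss + 1 : Nat) : Int) by push_cast; ring]
    rw [ih (ss + 1) (by omega) _
      (by intro x y hx hy
          by_cases hys : x = ss + 1 ∧ 0 < y ∧ y ≤ folding.length
          · rw [if_pos hys, hys.1]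
          · rw [if_neg hys]
            by_cases hx1 : x = ss + 1
            · have hy0 : y = 0 := by
                rcases Nat.eq_zero_or_pos y with h | h
                · exact h
                · exact absurd ⟨hx1, h, hy⟩ hys
              rw [hy0, h2 x 0 (by omega) (by omega) (by omega), pvPval_zero_right]
            · exact h1 x y (by omega) hy)
      (by intro x y hx hxn hy
          rw [if_neg (by rintro ⟨h1', _⟩; omega)]
          exact h2 x y (by omega) hxn hy)]

-- ===== B-side: the dp fill =====

lemma foldB_inner (folding : List Int) (m j : Nat) (hm : m < folding.length) (hj : j < folding.length) :
    ∀ (k c : Nat), c + k = j + 1 → m ≤ c → ∀ (H : Nat → Nat → Nat → Int),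
    (PySem.List.pyRange (c : Int) ((j : Int) + 1) 1).foldl
        (pvBodyBdp (pvTb2 folding.length (fun x y => pvPval folding x y)) (m : Int) (j : Int)) (pvTb3 folding.length H)
      = pvTb3 folding.length (fun x y z =>
          if x = m ∧ y = j ∧ c ≤ z ∧ z ≤ j then pvCellB folding m j z else H x y z) := by
  intro k
  induction k with
  | zero =>
    intro c hc hmc H
    rw [PySem.List.pyRange_one_eq_nil (by omega)]
    simp only [List.foldl_nil]
    apply pvTb3_congr
    intro x y z _ _ _
    rw [if_neg (by rintro ⟨_, _, h3, h4⟩; omega)]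
  | succ k ih =>
    intro c hc hmc H
    have hcj : c ≤ j := by omega
    have hcn : c < folding.length := by omega
    rw [PySem.List.pyRange_one_cons (by omega)]
    simp only [List.foldl_cons]
    have hbody : pvBodyBdp (pvTb2 folding.length (fun x y => pvPval folding x y)) (m : Int) (j : Int)
          (pvTb3 folding.length H) (c : Int)
        = pvTb3 folding.length (fun x y z =>
            if x = m ∧ y = j ∧ z = c then pvCellB folding m j c else H x y z) := by
      simp only [pvBodyBdp]
      rw [show ((c : Int) + 1) = ((c + 1 : Nat) : Int) by push_cast; ring,
          show ((j : Int) + 1) = ((j + 1 : Nat) : Int) by push_cast; ring]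
      rw [pvRead2_tb2 _ _ _ _ (by omega) (by omega),
          pvRead2_tb2 _ _ _ _ (by omega) (by omega),
          pvRead2_tb2 _ _ _ _ (by omega) (by omega),
          pvRead2_tb2 _ _ _ _ (by omega) (by omega),
          pvWrite3_tb3 _ _ _ _ _ _ (by omega) hj hcn]
      unfold pvCellB
      rfl
    rw [hbody]
    rw [show ((c : Int) + 1) = ((c + 1 : Nat) : Int) by push_cast; ring]
    rw [ih (c + 1) (by omega) (by omega) _]
    apply pvTb3_congr
    intro x y z _ _ _
    by_cases hxy : x = m ∧ y = j
    · obtain ⟨h1, h2⟩ := hxy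
      by_cases hz1 : c + 1 ≤ z ∧ z ≤ j
      · rw [if_pos ⟨h1, h2, hz1.1, hz1.2⟩, if_pos ⟨h1, h2, by omega, hz1.2⟩]
      · rw [if_neg (by rintro ⟨_, _, h3, h4⟩; exact hz1 ⟨h3, h4⟩)]
        by_cases hz2 : z = c
        · rw [if_pos ⟨h1, h2, hz2⟩, if_pos ⟨h1, h2, by omega, by omega⟩, hz2]
        · rw [if_neg (by rintro ⟨_, _, h3⟩; exact hz2 h3),
              if_neg (by rintro ⟨_, _, h3, h4⟩; omega)]
    · rw [if_neg (by tauto), if_neg (by tauto), if_neg (by tauto)]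

lemma foldB_mid (folding : List Int) (m : Nat) (hm : m < folding.length) :
    ∀ (k jj : Nat), jj + k = folding.length → ∀ (H : Nat → Nat → Nat → Int),
    (PySem.List.pyRange (jj : Int) (folding.length : Int) 1).foldl
        (fun dp end_ => (PySem.List.pyRange (m : Int) (end_ + 1) 1).foldl
          (pvBodyBdp (pvTb2 folding.length (fun x y => pvPval folding x y)) (m : Int) end_) dp)
        (pvTb3 folding.length H)
      = pvTb3 folding.length (fun x y z =>
          if x = m ∧ jj ≤ y ∧ m ≤ z ∧ z ≤ y then pvCellB folding m y z else H x y z) := by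
  intro k
  induction k with
  | zero =>
    intro jj hjj H
    rw [PySem.List.pyRange_one_eq_nil (by omega)]
    simp only [List.foldl_nil]
    apply pvTb3_congr
    intro x y z _ hy _
    rw [if_neg (by rintro ⟨_, h2, _, _⟩; omega)]
  | succ k ih =>
    intro jj hjj H
    have hjn : jj < folding.length := by omega
    rw [PySem.List.pyRange_one_cons (by omega)]
    simp only [List.foldl_cons]
    by_cases hmjj : m ≤ jj
    · rw [foldB_inner folding m jj hm hjn (jj + 1 - m) m (by omega) (le_refl m) H]
      rw [show ((jj : Int) + 1) = ((jj + 1 : Nat) : Int) by push_cast; ring]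
      rw [ih (jj + 1) (by omega) _]
      apply pvTb3_congr
      intro x y z _ hy _
      by_cases hx : x = m
      · by_cases hy1 : jj + 1 ≤ y ∧ m ≤ z ∧ z ≤ y
        · rw [if_pos ⟨hx, hy1⟩, if_pos ⟨hx, by omega, hy1.2⟩]
        · rw [if_neg (by rintro ⟨_, h2, h3⟩; exact hy1 ⟨h2, h3⟩)]
          by_cases hy2 : y = jj ∧ m ≤ z ∧ z ≤ jj
          · rw [if_pos ⟨hx, hy2⟩, if_pos ⟨hx, by omega, hy2.2.1, by omega⟩, hy2.1]
          · rw [if_neg (by rintro ⟨_, h2, h3⟩; exact hy2 ⟨h2, h3⟩),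
                if_neg (by
                  rintro ⟨_, h2, h3, h4⟩
                  rcases Nat.lt_or_ge y (jj + 1) with hlt | hge
                  · exact hy2 ⟨by omega, h3, by omega⟩
                  · exact hy1 ⟨hge, h3, h4⟩)]
      · rw [if_neg (by tauto), if_neg (by tauto), if_neg (by tauto)]
    · rw [PySem.List.pyRange_one_eq_nil (by omega)]
      simp only [List.foldl_nil]
      rw [show ((jj : Int) + 1) = ((jj + 1 : Nat) : Int) by push_cast; ring]
      rw [ih (jj + 1) (by omega) H]
      apply pvTb3_congr
      intro x y z _ _ _
      by_cases hcond : x = m ∧ jj + 1 ≤ y ∧ m ≤ z ∧ z ≤ y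
      · rw [if_pos hcond, if_pos ⟨hcond.1, by omega, hcond.2.2⟩]
      · rw [if_neg hcond, if_neg (by rintro ⟨h1, h2, h3, h4⟩; exact hcond ⟨h1, by omega, h3, h4⟩)]

lemma foldB_outer (folding : List Int) :
    ∀ (k mm : Nat), mm + k = folding.length → ∀ (H : Nat → Nat → Nat → Int),
    (PySem.List.pyRange (mm : Int) (folding.length : Int) 1).foldl
        (fun dp start => (PySem.List.pyRange 0 (folding.length : Int) 1).foldl
          (fun dp end_ => (PySem.List.pyRange start (end_ + 1) 1).foldl
            (pvBodyBdp (pvTb2 folding.length (fun x y => pvPval folding x y)) start end_) dp) dp)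
        (pvTb3 folding.length H)
      = pvTb3 folding.length (fun x y z =>
          if mm ≤ x ∧ x < folding.length ∧ x ≤ z ∧ z ≤ y then pvCellB folding x y z else H x y z) := by
  intro k
  induction k with
  | zero =>
    intro mm hmm H
    rw [show PySem.List.pyRange (mm : Int) (folding.length : Int) 1 = []
        from PySem.List.pyRange_one_eq_nil (by omega)]
    simp only [List.foldl_nil]
    apply pvTb3_congr
    intro x y z _ _ _
    rw [if_neg (by rintro ⟨h1, h2, _⟩; omega)]
  | succ k ih =>
    intro mm hmm H
    have hmn : mm < folding.length := by omega
    rw [show PySem.List.pyRange (mm : Int) (folding.length : Int) 1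
          = (mm : Int) :: PySem.List.pyRange ((mm : Int) + 1) (folding.length : Int) 1
        from PySem.List.pyRange_one_cons (by omega)]
    simp only [List.foldl_cons]
    have hmid := foldB_mid folding mm hmn folding.length 0 (by omega) H
    simp only [Nat.cast_zero] at hmid
    rw [hmid]
    rw [show ((mm : Int) + 1) = ((mm + 1 : Nat) : Int) by push_cast; ring]
    rw [ih (mm + 1) (by omega) _]
    apply pvTb3_congr
    intro x y z _ _ _
    by_cases h1 : mm + 1 ≤ x ∧ x < folding.length ∧ x ≤ z ∧ z ≤ y
    · rw [if_pos h1, if_pos ⟨by omega, h1.2⟩]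
    · rw [if_neg h1]
      by_cases h2 : x = mm ∧ 0 ≤ y ∧ mm ≤ z ∧ z ≤ y
      · rw [if_pos h2, if_pos ⟨by omega, by omega, by omega, h2.2.2.2⟩, h2.1]
      · rw [if_neg h2, if_neg (by
          rintro ⟨h3, h4, h5, h6⟩
          rcases Nat.lt_or_ge x (mm + 1) with hlt | hge
          · exact h2 ⟨by omega, Nat.zero_le _, by omega, h6⟩
          · exact h1 ⟨hge, h4, h5, h6⟩)]

lemma B_eq (folding : List Int) :
    count_overlapping_basepairs_alt folding
      = pvTb3 folding.length (fun i e p =>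
          if i < folding.length ∧ i ≤ p ∧ p ≤ e then pvCellB folding i e p else 0) := by
  simp only [count_overlapping_basepairs_alt]
  have hP0 : (PySem.List.pyRange 0 ((folding.length : Int) + 1) 1).map (fun _ =>
      (PySem.List.pyRange 0 ((folding.length : Int) + 1) 1).map (fun _ => (0 : Int)))
      = pvTb2 folding.length (fun _ _ => 0) := by
    rw [show ((folding.length : Int) + 1) = ((folding.length + 1 : Nat) : Int) by push_cast; ring,
        PySem.List.pyRange_zero_nat]
    unfold pvTb2
    simp only [List.map_map]
    rfl
  rw [hP0]
  have hPfold := foldBP_outer folding folding.length 0 (by omega) (fun _ _ => 0)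
    (by intro x y hx _
        have hx0 : x = 0 := by omega
        rw [hx0]
        unfold pvPval
        simp)
    (by intro _ _ _ _ _; rfl)
  simp only [Nat.cast_zero] at hPfold
  rw [hPfold]
  have hinit : (PySem.List.pyRange 0 ((folding.length : Int) + 1) 1).map (fun _ =>
      (PySem.List.pyRange 0 (folding.length : Int) 1).map (fun _ =>
        (PySem.List.pyRange 0 (folding.length : Int) 1).map (fun _ => (0 : Int))))
      = pvTb3 folding.length (fun _ _ _ => 0) := by
    rw [show ((folding.length : Int) + 1) = ((folding.length + 1 : Nat) : Int) by push_cast; ring,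
        PySem.List.pyRange_zero_nat, PySem.List.pyRange_zero_nat]
    unfold pvTb3
    simp only [List.map_map]
    rfl
  rw [hinit]
  have hdp := foldB_outer folding folding.length 0 (by omega) (fun _ _ _ => 0)
  simp only [Nat.cast_zero] at hdp
  rw [hdp]
  apply pvTb3_congr
  intro x y z _ _ _
  by_cases hc : x < folding.length ∧ x ≤ z ∧ z ≤ y
  · rw [if_pos ⟨Nat.zero_le _, hc⟩, if_pos hc]
  · rw [if_neg (by rintro ⟨_, h2⟩; exact hc h2), if_neg hc]

-- ===== the numeric bridge: rectangle query = A's recurrence =====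

lemma pvFin_eq_sum (folding : List Int) :
    ∀ (k start e p : Nat), start + k = p → p ≤ e → p < folding.length →
    pvFin folding start e p =
      ((List.range (p + 1 - start)).map (fun t => pvInd folding (start + t) e p)).sum := by
  intro k
  induction k with
  | zero =>
    intro start e p hk hpe hpn
    have hsp : start = p := by omega
    subst hsp
    rw [pvFin_eq, if_pos hpn, if_pos ⟨le_refl _, hpe⟩]
    have hnext : pvFin folding (start + 1) e start = 0 := by
      rw [pvFin_eq]
      split_ifs with h1 h2
      · omega
      · rfl
      · rfl
    rw [hnext, zero_add]
    rw [show start + 1 - start = 1 by omega]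
    simp
  | succ k ih =>
    intro start e p hk hpe hpn
    have hsp : start < p := by omega
    have hsn : start < folding.length := by omega
    rw [pvFin_eq, if_pos hsn, if_pos ⟨by omega, hpe⟩]
    rw [ih (start + 1) e p (by omega) hpe hpn]
    rw [show p + 1 - start = (p - start) + 1 by omega, List.range_succ_eq_map]
    simp only [List.map_cons, List.sum_cons, List.map_map, Nat.add_zero]
    have hmap : ((List.range (p - start)).map ((fun t => pvInd folding (start + t) e p) ∘ Nat.succ)).sum
        = ((List.range (p + 1 - (start + 1))).map (fun t => pvInd folding (start + 1 + t) e p)).sum := by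
      rw [show p + 1 - (start + 1) = p - start by omega]
      congr 1
      apply List.map_congr_left
      intro t _
      simp only [Function.comp]
      rw [show start + Nat.succ t = start + 1 + t by omega]
    rw [← hmap]
    ring

lemma pvPval_sub (folding : List Int) (a q : Nat) :
    ∀ (d : Nat), pvPval folding (a + d) q - pvPval folding a q =
      ((List.range d).map (fun t =>
        if ((a + t : Nat) : Int) < pvF folding (a + t) ∧ pvF folding (a + t) < (q : Int) then (1 : Int) else 0)).sum := by
  intro d
  induction d with
  | zero => simp
  | succ d ihd =>
    rw [show a + (d + 1) = (a + d) + 1 by omega, pvPval_succ, List.range_succ]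
    simp only [List.map_append, List.map_cons, List.map_nil, List.sum_append, List.sum_cons,
      List.sum_nil, add_zero]
    omega

lemma pvCellB_eq_fin (folding : List Int) (i e p : Nat)
    (h1 : i ≤ p) (h2 : p ≤ e) (h3 : p < folding.length) :
    pvCellB folding i e p = pvFin folding i e p := by
  have hpe : (p : Int) ≤ (e : Int) := by exact_mod_cast h2
  unfold pvCellB
  rw [pvFin_eq_sum folding (p - i) i e p (by omega) h2 h3]
  have h1' := pvPval_sub folding i (e + 1) (p + 1 - i)
  have h2' := pvPval_sub folding i p (p + 1 - i)
  rw [show i + (p + 1 - i) = p + 1 by omega] at h1' h2'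
  have hterm : ∀ tl : List Nat,
      ((tl.map (fun t => if ((i + t : Nat) : Int) < pvF folding (i + t) ∧ pvF folding (i + t) < ((e + 1 : Nat) : Int) then (1 : Int) else 0)).sum)
        - ((tl.map (fun t => if ((i + t : Nat) : Int) < pvF folding (i + t) ∧ pvF folding (i + t) < ((p : Nat) : Int) then (1 : Int) else 0)).sum)
      = (tl.map (fun t => pvInd folding (i + t) e p)).sum := by
    intro tl
    induction tl with
    | nil => simp
    | cons hd tlr ihl =>
      simp only [List.map_cons, List.sum_cons]
      have hone : (if ((i + hd : Nat) : Int) < pvF folding (i + hd) ∧ pvF folding (i + hd) < ((e + 1 : Nat) : Int) then (1 : Int) else 0)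
          - (if ((i + hd : Nat) : Int) < pvF folding (i + hd) ∧ pvF folding (i + hd) < ((p : Nat) : Int) then (1 : Int) else 0)
          = pvInd folding (i + hd) e p := by
        unfold pvInd
        push_cast
        split_ifs <;> omega
      omega
  have := hterm (List.range (p + 1 - i))
  omega

-- ===== VERDICT (by name: the statement is the Claim_ definition above) =====
theorem count_overlapping_basepairs_spec : Claim_equal_count_overlapping_basepairs := by
  intro folding _
  unfold Spec_count_overlapping_basepairs
  rw [A_eq, B_eq]
  apply pvTb3_congr
  intro i e p hi he hp
  simp only [pvHt, Nat.zero_le, if_true]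
  by_cases hin : i < folding.length
  · by_cases hband : i ≤ p ∧ p ≤ e
    · rw [if_pos ⟨hin, hband.1, hband.2⟩, pvCellB_eq_fin folding i e p hband.1 hband.2 hp]
    · rw [pvFin_eq, if_pos hin, if_neg hband, if_neg (by tauto)]
  · rw [pvFin_eq, if_neg hin, if_neg (by tauto)]
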